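-- pv_equiv track=rewrite | github.com/LavKumarShakya/Solution-Challenge | AetherLearn/backend/utils/vertex_ai.py | _determine_resource_type_enhanced
-- ===== SOURCE A (Python) =====
-- def _determine_resource_type_enhanced(url: str, title: str, description: str) -> str:
--     """Enhanced resource type detection using multiple signals"""
--     if not url:
--         return "article"
--
--     url_lower = url.lower()
--     title_lower = title.lower()
--     desc_lower = description.lower()
--
--     # Video content detection
--     video_indicators = ["youtube.com", "vimeo.com", "video", "watch"]
--     if any(indicator in url_lower for indicator in video_indicators):
--         return "video"
--
--     # Course detection
--     course_indicators = ["course", "coursera.org/learn", "udemy.com/course", "edx.org/course", "class", "curriculum"]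
--     if any(indicator in url_lower for indicator in course_indicators) or \
--        any(indicator in title_lower for indicator in course_indicators):
--         return "course"
--
--     # Interactive content detection
--     interactive_indicators = ["github.com", "codepen.io", "repl.it", "interactive", "playground", "tutorial"]
--     if any(indicator in url_lower for indicator in interactive_indicators):
--         return "interactive"
--
--     # Documentation detection
--     doc_indicators = ["docs.", "/docs", "documentation", "reference", "api"]
--     if any(indicator in url_lower for indicator in doc_indicators):
--         return "documentation"
--
--     # Academic content detection
--     academic_indicators = [".edu", "arxiv.org", "research", "paper", "journal", "academic"]
--     if any(indicator in url_lower for indicator in academic_indicators):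
--         return "academic"
--
--     # Tutorial detection
--     tutorial_indicators = ["tutorial", "how-to", "guide", "step-by-step"]
--     if any(indicator in title_lower or indicator in desc_lower for indicator in tutorial_indicators):
--         return "tutorial"
--
--     return "article"  # Default fallback
-- ===== SOURCE B (Python) =====
-- # Flattened-signal formulation: every (keyword, field, priority) triple in one table;
-- # a single accumulator pass keeps the minimum matched priority (no early returns),
-- # which is then mapped to the type name.
--
-- _NAMES = ("video", "course", "interactive", "documentation", "academic", "tutorial", "article")
--
-- _TABLE = (
--     [(kw, 0, 0) for kw in ("youtube.com", "vimeo.com", "video", "watch")]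
--     + [(kw, f, 1) for f in (0, 1)
--        for kw in ("course", "coursera.org/learn", "udemy.com/course", "edx.org/course", "class", "curriculum")]
--     + [(kw, 0, 2) for kw in ("github.com", "codepen.io", "repl.it", "interactive", "playground", "tutorial")]
--     + [(kw, 0, 3) for kw in ("docs.", "/docs", "documentation", "reference", "api")]
--     + [(kw, 0, 4) for kw in (".edu", "arxiv.org", "research", "paper", "journal", "academic")]
--     + [(kw, f, 5) for kw in ("tutorial", "how-to", "guide", "step-by-step") for f in (1, 2)]
-- )
--
--
-- def _determine_resource_type_enhanced(url: str, title: str, description: str) -> str: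
--     """Resource type = name of the minimum-priority matched signal (article if none)."""
--     if not url:
--         return "article"
--     fields = (url.lower(), title.lower(), description.lower())
--     best = 6
--     for kw, fi, pr in _TABLE:
--         if pr < best and kw in fields[fi]:
--             best = pr
--     return _NAMES[best]
-- ===== Notes on version B (the rewrite author's own statement) =====
-- stated objective: alternative
-- what changed: B flattens all signals into one (keyword, field, priority) table and makes a single accumulator pass keeping the minimum matched priority (no early returns), then maps that priority to the type name; A is a six-branch early-return if-cascade over per-type indicator lists.
import Mathlib
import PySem

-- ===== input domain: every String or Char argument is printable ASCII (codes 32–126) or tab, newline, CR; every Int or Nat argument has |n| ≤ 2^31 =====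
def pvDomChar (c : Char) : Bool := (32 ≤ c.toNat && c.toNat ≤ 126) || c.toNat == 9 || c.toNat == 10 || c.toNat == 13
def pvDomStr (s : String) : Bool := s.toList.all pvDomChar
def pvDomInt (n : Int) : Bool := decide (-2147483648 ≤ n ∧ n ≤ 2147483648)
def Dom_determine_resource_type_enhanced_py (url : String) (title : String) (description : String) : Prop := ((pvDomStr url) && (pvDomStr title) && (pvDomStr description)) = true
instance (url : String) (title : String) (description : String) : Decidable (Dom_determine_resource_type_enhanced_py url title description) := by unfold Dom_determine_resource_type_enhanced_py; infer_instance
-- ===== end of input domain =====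

-- B replaces A's six-branch early-return cascade by a flat (keyword, field, priority) signal
-- table and one accumulator pass keeping the minimum matched priority (objective: alternative);
-- return values are identical on all inputs.

-- ===== PORT A =====
def determine_resource_type_enhanced_py (url : String) (title : String) (description : String) : String :=
  if url = "" then "article"
  else
    let url_lower := PySem.Str.lower url
    let title_lower := PySem.Str.lower title
    let desc_lower := PySem.Str.lower description
    let video_indicators : List String := ["youtube.com", "vimeo.com", "video", "watch"]
    if video_indicators.any (fun i => PySem.Str.isIn i url_lower) then "video"
    else
      let course_indicators : List String := ["course", "coursera.org/learn", "udemy.com/course", "edx.org/course", "class", "curriculum"]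
      if course_indicators.any (fun i => PySem.Str.isIn i url_lower) ||
         course_indicators.any (fun i => PySem.Str.isIn i title_lower) then "course"
      else
        let interactive_indicators : List String := ["github.com", "codepen.io", "repl.it", "interactive", "playground", "tutorial"]
        if interactive_indicators.any (fun i => PySem.Str.isIn i url_lower) then "interactive"
        else
          let doc_indicators : List String := ["docs.", "/docs", "documentation", "reference", "api"]
          if doc_indicators.any (fun i => PySem.Str.isIn i url_lower) then "documentation"
          else
            let academic_indicators : List String := [".edu", "arxiv.org", "research", "paper", "journal", "academic"]
            if academic_indicators.any (fun i => PySem.Str.isIn i url_lower) then "academic"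
            else
              let tutorial_indicators : List String := ["tutorial", "how-to", "guide", "step-by-step"]
              if tutorial_indicators.any (fun i => PySem.Str.isIn i title_lower || PySem.Str.isIn i desc_lower) then "tutorial"
              else "article"

-- ===== PORT B =====
-- the flattened signal table _TABLE of Source B: (keyword, field index, priority)
def pvTable : List (String × Nat × Nat) :=
  [("youtube.com", 0, 0),
   ("vimeo.com", 0, 0),
   ("video", 0, 0),
   ("watch", 0, 0),
   ("course", 0, 1),
   ("coursera.org/learn", 0, 1),
   ("udemy.com/course", 0, 1),
   ("edx.org/course", 0, 1),
   ("class", 0, 1),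
   ("curriculum", 0, 1),
   ("course", 1, 1),
   ("coursera.org/learn", 1, 1),
   ("udemy.com/course", 1, 1),
   ("edx.org/course", 1, 1),
   ("class", 1, 1),
   ("curriculum", 1, 1),
   ("github.com", 0, 2),
   ("codepen.io", 0, 2),
   ("repl.it", 0, 2),
   ("interactive", 0, 2),
   ("playground", 0, 2),
   ("tutorial", 0, 2),
   ("docs.", 0, 3),
   ("/docs", 0, 3),
   ("documentation", 0, 3),
   ("reference", 0, 3),
   ("api", 0, 3),
   (".edu", 0, 4),
   ("arxiv.org", 0, 4),
   ("research", 0, 4),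
   ("paper", 0, 4),
   ("journal", 0, 4),
   ("academic", 0, 4),
   ("tutorial", 1, 5),
   ("tutorial", 2, 5),
   ("how-to", 1, 5),
   ("how-to", 2, 5),
   ("guide", 1, 5),
   ("guide", 2, 5),
   ("step-by-step", 1, 5),
   ("step-by-step", 2, 5)]

-- _NAMES of Source B
def pvNames : List String :=
  ["video", "course", "interactive", "documentation", "academic", "tutorial", "article"]

-- fields[fi] (the tuple index of Source B; fi is always 0, 1 or 2)
def pvField (fs : String × String × String) (i : Nat) : String :=
  match i with | 0 => fs.1 | 1 => fs.2.1 | _ => fs.2.2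

-- 'kw in fields[fi]' for one table entry
def pvHit (fs : String × String × String) (e : String × Nat × Nat) : Bool :=
  PySem.Str.isIn e.1 (pvField fs e.2.1)

-- the accumulator loop of Source B: keep the minimum matched priority
def pvBest (fs : String × String × String) : List (String × Nat × Nat) → Nat → Nat
  | [], best => best
  | e :: rest, best =>
      pvBest fs rest (if decide (e.2.2 < best) && pvHit fs e then e.2.2 else best)

def determine_resource_type_enhanced_py_alt (url : String) (title : String) (description : String) : String :=
  if url = "" then "article"
  else
    let fs := (PySem.Str.lower url, PySem.Str.lower title, PySem.Str.lower description)
    -- _NAMES[best]: best is always ≤ 6, so the index is in range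
    pvNames.getD (pvBest fs pvTable 6) "article"

-- ===== PRECONDITION & SPEC =====
def Spec_determine_resource_type_enhanced_py (url : String) (title : String) (description : String) (out : String) : Prop := out = determine_resource_type_enhanced_py_alt url title description
instance (url : String) (title : String) (description : String) (out : String) : Decidable (Spec_determine_resource_type_enhanced_py url title description out) := by unfold Spec_determine_resource_type_enhanced_py; infer_instance

-- ===== CLAIM (what is proved, stated in full; the proofs are below) =====
def Claim_equal_determine_resource_type_enhanced_py : Prop := ∀ (url : String) (title : String) (description : String), Dom_determine_resource_type_enhanced_py url title description → Spec_determine_resource_type_enhanced_py url title description (determine_resource_type_enhanced_py url title description)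

-- ===== LEMMAS AND PROOFS =====

-- the priority of the first matching entry (else the default); used only to characterise pvBest
def pvFirst (fs : String × String × String) : List (String × Nat × Nat) → Nat → Nat
  | [], d => d
  | e :: rest, d => if pvHit fs e then e.2.2 else pvFirst fs rest d

-- once the accumulator is ≤ every remaining priority, the loop no longer changes it
theorem pvBest_stop (fs : String × String × String) (l : List (String × Nat × Nat)) (best : Nat)
    (h : ∀ e ∈ l, ¬ e.2.2 < best) : pvBest fs l best = best := by
  induction l with
  | nil => rfl
  | cons e rest ih =>
      have he : ¬ e.2.2 < best := h e (List.mem_cons_self ..)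
      simp only [pvBest, decide_eq_false he, Bool.false_and, Bool.false_eq_true, if_false]
      exact ih (fun e' h' => h e' (List.mem_cons_of_mem _ h'))

-- on a table with nondecreasing priorities all below the initial accumulator, the
-- minimum-priority pass returns the priority of the FIRST matching entry
theorem pvBest_first (fs : String × String × String) (l : List (String × Nat × Nat)) (best : Nat)
    (hs : l.Pairwise (fun a b => a.2.2 ≤ b.2.2)) (hb : ∀ e ∈ l, e.2.2 < best) :
    pvBest fs l best = pvFirst fs l best := by
  induction l with
  | nil => rfl
  | cons e rest ih =>
      rw [List.pairwise_cons] at hs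
      by_cases hhit : pvHit fs e = true
      · simp only [pvBest, pvFirst, hhit,
          decide_eq_true (hb e (List.mem_cons_self ..)), Bool.true_and, if_true]
        exact pvBest_stop fs rest e.2.2 (fun e' h' => by
          have := hs.1 e' h'; omega)
      · simp only [pvBest, pvFirst, hhit, Bool.and_false, Bool.false_eq_true, if_false]
        exact ih hs.2 (fun e' h' => hb e' (List.mem_cons_of_mem _ h'))

-- bridges A's '(if a || b then x else y)' tests to the flattened one-atom-per-if form
theorem pv_if_or {α : Type} (a b : Bool) (x y : α) :
    (if (a || b) then x else y) = if a then x else if b then x else y := by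
  cases a <;> cases b <;> simp

-- ===== VERDICT (by name: the statement is the Claim_ definition above) =====
theorem determine_resource_type_enhanced_py_spec : Claim_equal_determine_resource_type_enhanced_py := by
  intro url title description _
  unfold Spec_determine_resource_type_enhanced_py determine_resource_type_enhanced_py
    determine_resource_type_enhanced_py_alt
  by_cases h : url = ""
  · simp [h]
  · rw [if_neg h, if_neg h]
    have hBF : ∀ fs, pvBest fs pvTable 6 = pvFirst fs pvTable 6 :=
      fun fs => pvBest_first fs pvTable 6 (by decide) (by decide)
    simp only [hBF]
    simp only [pvFirst, pvTable, pvHit, pvField, List.any_cons, List.any_nil,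
      Bool.or_false, pv_if_or, apply_ite (fun n : Nat => pvNames.getD n "article")]
    norm_num [pvNames, List.getD]
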